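-- pv_equiv track=rewrite | github.com/kimjune01/june.kim | worklog/h14_final.py | temporal_reach_from
-- ===== SOURCE A (Python) =====
-- import heapq
--
-- def temporal_reach_from(source, adj, depart=-1):
--     best = {source: depart}
--     queue = [(depart, source)]
--     while queue:
--         t_arr, u = heapq.heappop(queue)
--         if t_arr > best.get(u, float('inf')):
--             continue
--         for (v, te) in adj[u]:
--             if te >= t_arr and te < best.get(v, float('inf')):
--                 best[v] = te
--                 heapq.heappush(queue, (te, v))
--     return best
-- ===== SOURCE B (Python) =====
-- # Heap-free, dict-free re-implementation: eager temporal Dijkstra over a plain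
-- # association list of (node, earliest-arrival) pairs rebuilt functionally, with an
-- # explicit settled list; each round settles the minimum (time, node) candidate.
-- def temporal_reach_from(source, adj, depart=-1):
--     pairs = [(source, depart)]
--     settled = []
--     while True:
--         cand = [(t, v) for (v, t) in pairs if v not in settled]
--         if not cand:
--             return dict(pairs)
--         ut, u = min(cand)
--         settled.append(u)
--         for (v, te) in adj[u]:
--             b = _lookup(pairs, v)
--             if te >= ut and (b is None or te < b):
--                 pairs = _store(pairs, v, te)
--
--
-- def _lookup(pairs, v):
--     for (w, t) in pairs:
--         if w == v:
--             return t
--     return None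
--
--
-- def _store(pairs, v, te):
--     for i, (w, _) in enumerate(pairs):
--         if w == v:
--             return pairs[:i] + [(v, te)] + pairs[i + 1:]
--     return pairs + [(v, te)]
-- ===== Notes on version B (the rewrite author's own statement) =====
-- stated objective: alternative
-- what changed: Replaces the lazy binary-heap-plus-dict Dijkstra (stale heap entries skipped on pop) by a heap-free, dict-free eager version: the state is a plain association list of (node, time) pairs rebuilt functionally plus an explicit settled list, and each round picks the minimum (time, node) candidate by a linear comprehension-and-min scan.
import Mathlib
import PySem

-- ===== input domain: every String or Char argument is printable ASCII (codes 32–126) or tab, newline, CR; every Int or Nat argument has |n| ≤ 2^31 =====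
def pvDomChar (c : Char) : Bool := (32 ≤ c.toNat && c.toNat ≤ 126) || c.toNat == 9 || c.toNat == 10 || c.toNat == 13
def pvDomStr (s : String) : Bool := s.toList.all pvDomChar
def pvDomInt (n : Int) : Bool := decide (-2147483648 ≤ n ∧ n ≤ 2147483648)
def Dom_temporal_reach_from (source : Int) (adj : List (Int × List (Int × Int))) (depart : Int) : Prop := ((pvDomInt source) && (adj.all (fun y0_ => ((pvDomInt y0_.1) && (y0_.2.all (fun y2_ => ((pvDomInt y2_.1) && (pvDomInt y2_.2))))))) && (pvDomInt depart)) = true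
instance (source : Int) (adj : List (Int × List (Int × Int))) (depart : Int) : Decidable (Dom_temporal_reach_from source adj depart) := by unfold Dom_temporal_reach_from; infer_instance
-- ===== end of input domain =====

-- B replaces A's lazy heap-plus-dict Dijkstra by a heap-free, dict-free eager version over
-- a plain association list rebuilt functionally, with an explicit settled list; objective:
-- alternative (same results; not claimed faster).

-- ===== PORT A =====
-- Python tuple '<' on int pairs (the heap order)
def pvLt (p q : Int × Int) : Bool := p.1 < q.1 || (p.1 == q.1 && p.2 < q.2)

-- adj[u] as Python dict lookup: first matching key (none = KeyError, excluded by Pre_)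
def pvLookup (adj : List (Int × List (Int × Int))) (u : Int) : Option (List (Int × Int)) :=
  (adj.find? (fun p => p.1 == u)).map Prod.snd

-- heapq on int pairs: only the pop-minimum order is observable, so the heap is modeled
-- as the entry list with heappop = remove the lexicographic minimum (exact for int tuples)
def pvHeapMin : List (Int × Int) → Option (Int × Int)
  | [] => none
  | p :: q =>
    match pvHeapMin q with
    | none => some p
    | some m => if pvLt m p then some m else some p

-- the inner 'for (v, te) in adj[u]' loop of A: updates best, appends the pushes to the queue
def pvRelaxA (t : Int) (best : PySem.Dict Int Int) (es : List (Int × Int)) (q : List (Int × Int)) :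
    PySem.Dict Int Int × List (Int × Int) :=
  match es with
  | [] => (best, q)
  | (v, te) :: es =>
    if te ≥ t && (match best.get? v with | none => true | some b => decide (te < b)) then
      pvRelaxA t (best.insert v te) es (q ++ [(te, v)])
    else
      pvRelaxA t best es q

-- A's 'while queue' loop (fuel-bounded; the fuel is provably sufficient)
def pvLoopA (adj : List (Int × List (Int × Int))) :
    Nat → PySem.Dict Int Int → List (Int × Int) → PySem.Dict Int Int
  | 0, best, _ => best
  | fuel + 1, best, q =>
    match pvHeapMin q with
    | none => best
    | some (t, u) =>
      if (match best.get? u with | none => false | some b => decide (t > b)) then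
        pvLoopA adj fuel best (q.erase (t, u))
      else
        match pvLookup adj u with
        | none => best  -- Python raises KeyError here; excluded by Pre_
        | some es =>
          let r := pvRelaxA t best es (q.erase (t, u))
          pvLoopA adj fuel r.1 r.2

def pvEdgeCount (adj : List (Int × List (Int × Int))) : Nat :=
  (adj.map (fun p => p.2.length)).sum

def temporal_reach_from (source : Int) (adj : List (Int × List (Int × Int))) (depart : Int) : List (Int × Int) :=
  (pvLoopA adj (pvEdgeCount adj + 2) ((PySem.Dict.empty).insert source depart) [(depart, source)]).items

-- ===== PORT B =====
-- Source B's _lookup: first-match scan of an association list (None = absent)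
def pvFind {α : Type} : List (Int × α) → Int → Option α
  | [], _ => none
  | (w, t) :: ps, v => if w = v then some t else pvFind ps v

-- Source B's _store: pairs[:i] + [(v, te)] + pairs[i+1:] at the first entry for v, else append
def pvStore (v te : Int) : List (Int × Int) → List (Int × Int)
  | [] => [(v, te)]
  | (w, t) :: ps => if w = v then (v, te) :: ps else (w, t) :: pvStore v te ps

-- Source B's inner edge loop: fold the guarded store over adj[u]
def pvSweep (t : Int) (ps es : List (Int × Int)) : List (Int × Int) :=
  es.foldl (fun ps e =>
    if decide (t ≤ e.2) && (match pvFind ps e.1 with | none => true | some b => decide (e.2 < b)) then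
      pvStore e.1 e.2 ps
    else ps) ps

-- Source B's comprehension [(t, v) for (v, t) in pairs if v not in settled]
def pvCand (settled : List Int) (ps : List (Int × Int)) : List (Int × Int) :=
  (ps.filter (fun p => !settled.contains p.1)).map (fun p => (p.2, p.1))

-- Source B's 'while True' loop (fuel-bounded; each round settles a fresh node, so fuel suffices);
-- min(cand) on int 2-tuples is PySem.List.min2? with the two projections
def pvLoopB (adj : List (Int × List (Int × Int))) :
    Nat → List (Int × Int) → List Int → List (Int × Int)
  | 0, ps, _ => ps
  | fuel + 1, ps, settled =>
    match PySem.List.min2? (pvCand settled ps) (fun c => c.1) (fun c => c.2) with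
    | none => ps
    | some c =>
      match pvFind adj c.2 with
      | none => ps  -- Python raises KeyError here; excluded by Pre_
      | some es => pvLoopB adj fuel (pvSweep c.1 ps es) (settled ++ [c.2])

def temporal_reach_from_alt (source : Int) (adj : List (Int × List (Int × Int))) (depart : Int) : List (Int × Int) :=
  (PySem.Dict.ofList
    (pvLoopB adj ((adj.map (fun p => p.2.length)).sum + 2) [(source, depart)] [])).items

-- ===== PRECONDITION & SPEC =====
-- the pairs (v, te) reachable from one reachability pair p by a single admissible edge
def pvStepNews (adj : List (Int × List (Int × Int))) (R : List (Int × Int)) : List (Int × Int) :=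
  R.flatMap (fun p =>
    match pvLookup adj p.1 with
    | none => []
    | some es => es.filter (fun e => decide (p.2 ≤ e.2)))

def pvStep (adj : List (Int × List (Int × Int))) (R : List (Int × Int)) : List (Int × Int) :=
  PySem.Set.update R (pvStepNews adj R)

-- all (node, arrival time) pairs temporally reachable from (source, depart):
-- saturated closure of the input graph under 'follow an edge (v, te) with te ≥ current time'
def pvClosure (source : Int) (adj : List (Int × List (Int × Int))) (depart : Int) : List (Int × Int) :=
  (pvStep adj)^[pvEdgeCount adj + 1] [(source, depart)]

-- exactly the inputs on which A returns: every temporally reachable node must be a key of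
-- adj — A pops each reached node and evaluates adj[u], raising KeyError on a missing key
def Pre_temporal_reach_from (source : Int) (adj : List (Int × List (Int × Int))) (depart : Int) : Prop :=
  ∀ p ∈ pvClosure source adj depart, ∃ q ∈ adj, q.1 = p.1
instance (source : Int) (adj : List (Int × List (Int × Int))) (depart : Int) : Decidable (Pre_temporal_reach_from source adj depart) := by unfold Pre_temporal_reach_from; infer_instance

def pvWitness_temporal_reach_from : Int × (List (Int × List (Int × Int))) × Int :=
  (0, [(0, [(1, 3), (2, 1)]), (1, [(2, 4)]), (2, [])], -1)

def Spec_temporal_reach_from (source : Int) (adj : List (Int × List (Int × Int))) (depart : Int) (out : List (Int × Int)) : Prop := out = temporal_reach_from_alt source adj depart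
instance (source : Int) (adj : List (Int × List (Int × Int))) (depart : Int) (out : List (Int × Int)) : Decidable (Spec_temporal_reach_from source adj depart out) := by unfold Spec_temporal_reach_from; infer_instance

-- ===== CLAIM (what is proved, stated in full; the proofs are below) =====
def Claim_equal_temporal_reach_from : Prop := ∀ (source : Int) (adj : List (Int × List (Int × Int))) (depart : Int), Dom_temporal_reach_from source adj depart → Pre_temporal_reach_from source adj depart → Spec_temporal_reach_from source adj depart (temporal_reach_from source adj depart)

-- ===== LEMMAS AND PROOFS =====

-- all edge occurrences of adj (also the dup-shadowed ones; only used for counting bounds)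
def pvOccs (adj : List (Int × List (Int × Int))) : List (Int × Int) := adj.flatMap (fun p => p.2)

-- 1 while the edge (v, te) could still trigger a push
def pvInd (best : PySem.Dict Int Int) (e : Int × Int) : Nat :=
  match best.get? e.1 with | none => 1 | some b => if e.2 < b then 1 else 0

def pvPot (adj : List (Int × List (Int × Int))) (best : PySem.Dict Int Int) : Nat :=
  ((pvOccs adj).map (pvInd best)).sum

-- all nodes that can ever become keys of best
def pvNB (source : Int) (adj : List (Int × List (Int × Int))) : List Int :=
  PySem.Set.ofList (source :: (pvOccs adj).map Prod.fst)

-- the simulation invariant between A's state (best, q) and B's state (best.items, settled)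
def pvInv (source : Int) (adj : List (Int × List (Int × Int))) (depart : Int)
    (best : PySem.Dict Int Int) (q : List (Int × Int)) (settled : List Int) : Prop :=
  best.keys.Nodup ∧
  (∀ t v, (t, v) ∈ q → ∃ b, best.get? v = some b ∧ b ≤ t ∧ (v ∈ settled → b < t)) ∧
  (∀ v b, best.get? v = some b → v ∉ settled → (b, v) ∈ q) ∧
  q.Nodup ∧
  (∀ v ∈ settled, ∃ b, best.get? v = some b ∧ ∀ t w, (t, w) ∈ q → b ≤ t) ∧
  (∀ v ∈ best.keys, v ∈ pvNB source adj) ∧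
  settled.Nodup ∧
  (∀ v c, best.get? v = some c → (v, c) ∈ pvClosure source adj depart)


-- pvLt is the strict lexicographic order on int pairs
theorem pvLt_irrefl (a : Int × Int) : pvLt a a = false := by
  simp [pvLt]

theorem pvLt_trans {a b c : Int × Int} (h1 : pvLt a b = true) (h2 : pvLt b c = true) :
    pvLt a c = true := by
  obtain ⟨a1, a2⟩ := a; obtain ⟨b1, b2⟩ := b; obtain ⟨c1, c2⟩ := c
  simp only [pvLt, Bool.or_eq_true, Bool.and_eq_true, decide_eq_true_eq, beq_iff_eq] at *
  omega

theorem pvLt_antisymm {a b : Int × Int} (h1 : pvLt a b = false) (h2 : pvLt b a = false) : a = b := by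
  obtain ⟨a1, a2⟩ := a; obtain ⟨b1, b2⟩ := b
  simp only [pvLt, Bool.or_eq_false_iff, Bool.and_eq_false_iff, decide_eq_false_iff_not,
    beq_eq_false_iff_ne, ne_eq, Prod.mk.injEq] at *
  constructor <;> omega

theorem pvLt_total {a b : Int × Int} (h : pvLt a b = false) : pvLt b a = true ∨ a = b := by
  by_cases h2 : pvLt b a = true
  · exact Or.inl h2
  · exact Or.inr (pvLt_antisymm h (by simpa using h2))

theorem pvLt_fst_le {a b : Int × Int} (h : pvLt a b = false) : b.1 ≤ a.1 := by
  obtain ⟨a1, a2⟩ := a; obtain ⟨b1, b2⟩ := b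
  simp only [pvLt, Bool.or_eq_false_iff, Bool.and_eq_false_iff, decide_eq_false_iff_not,
    beq_eq_false_iff_ne, ne_eq] at h
  simp only []
  omega

-- heap extraction: the returned element is a member and a minimum
theorem pvHeapMin_eq_none {q : List (Int × Int)} : pvHeapMin q = none ↔ q = [] := by
  cases q with
  | nil => simp [pvHeapMin]
  | cons p q =>
    simp only [pvHeapMin]
    cases pvHeapMin q with
    | none => simp
    | some m => by_cases h : pvLt m p = true <;> simp [h]

theorem pvHeapMin_mem : ∀ {q : List (Int × Int)} {m}, pvHeapMin q = some m → m ∈ q := by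
  intro q
  induction q with
  | nil => intro m h; simp [pvHeapMin] at h
  | cons p q ih =>
    intro m h
    simp only [pvHeapMin] at h
    cases hq : pvHeapMin q with
    | none => rw [hq] at h; simp at h; simp [h]
    | some m' =>
      rw [hq] at h
      by_cases hlt : pvLt m' p = true
      · simp [hlt] at h; subst h; exact List.mem_cons_of_mem _ (ih hq)
      · simp [hlt] at h; simp [h]

theorem pvHeapMin_min : ∀ {q : List (Int × Int)} {m}, pvHeapMin q = some m →
    ∀ p ∈ q, pvLt p m = false := by
  intro q
  induction q with
  | nil => intro m h; simp [pvHeapMin] at h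
  | cons x q ih =>
    intro m h p hp0
    have hp := List.mem_cons.mp hp0
    simp only [pvHeapMin] at h
    cases hq : pvHeapMin q with
    | none =>
      rw [hq] at h; simp at h; subst h
      rw [pvHeapMin_eq_none.mp hq] at hp
      simp at hp; subst hp; exact pvLt_irrefl _
    | some m' =>
      rw [hq] at h
      by_cases hlt : pvLt m' x = true
      · simp [hlt] at h; subst h
        rcases hp with hp | hp
        · subst hp
          by_cases hc : pvLt p m' = true
          · have := pvLt_trans hc (by simpa using hlt)
            · rw [pvLt_irrefl] at this; exact absurd this (by simp)
          · simpa using hc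
        · exact ih hq p hp
      · simp [hlt] at h; subst h
        rcases hp with hp | hp
        · subst hp; exact pvLt_irrefl _
        · have hm' := ih hq p hp
          by_cases hc : pvLt p x = true
          · rcases pvLt_total (by simpa using hlt) with h2 | h2
            · have := pvLt_trans hc h2
              rw [hm'] at this; exact absurd this (by simp)
            · rw [h2] at hm'; rw [hm'] at hc; exact absurd hc (by simp)
          · simpa using hc

-- potential: every push turns off at least one edge indicator
theorem pvInd_le_one (best : PySem.Dict Int Int) (e : Int × Int) : pvInd best e ≤ 1 := by
  cases hb : best.get? e.1 with
  | none => simp [pvInd, hb]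
  | some b => simp only [pvInd, hb]
              split <;> omega

theorem pvSum_map_le_length (l : List (Int × Int)) (f : Int × Int → Nat) (h : ∀ x, f x ≤ 1) :
    (l.map f).sum ≤ l.length := by
  induction l with
  | nil => simp
  | cons x l ih => simp only [List.map_cons, List.sum_cons, List.length_cons]
                   have := h x; omega

theorem pvPot_le (adj : List (Int × List (Int × Int))) (best : PySem.Dict Int Int) :
    pvPot adj best ≤ (pvOccs adj).length :=
  pvSum_map_le_length _ _ (pvInd_le_one best)

theorem pvSum_map_lt (l : List (Int × Int)) (f g : Int × Int → Nat)
    (hle : ∀ x ∈ l, f x ≤ g x) (s : Int × Int) (hs : s ∈ l) (hstrict : f s < g s) :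
    (l.map f).sum < (l.map g).sum := by
  induction l with
  | nil => simp at hs
  | cons x l ih =>
    simp only [List.map_cons, List.sum_cons]
    rcases List.mem_cons.mp hs with h | h
    · subst h
      have h2 : (l.map f).sum ≤ (l.map g).sum :=
        List.sum_le_sum (by intro i hi; exact hle i (List.mem_cons_of_mem _ (by simpa using hi)))
      omega
    · have h1 := hle x (List.mem_cons_self)
      have h2 := ih (fun y hy => hle y (List.mem_cons_of_mem _ hy)) h
      omega

theorem pvInd_insert_le (best : PySem.Dict Int Int) (v te : Int)
    (hcond : ∀ b, best.get? v = some b → te < b) (e : Int × Int) :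
    pvInd (best.insert v te) e ≤ pvInd best e := by
  obtain ⟨w, s⟩ := e
  have hins := PySem.Dict.get?_insert best v w te
  by_cases he : w = v
  · rw [if_pos he] at hins
    cases hb : best.get? w with
    | none => simp only [pvInd, hins, hb]
              split <;> omega
    | some b =>
      have := hcond b (he ▸ hb)
      simp only [pvInd, hins, hb]
      by_cases hs : s < te
      · rw [if_pos hs, if_pos (by omega : s < b)]
      · rw [if_neg hs]; omega
  · rw [if_neg he] at hins
    simp only [pvInd, hins]
    exact Nat.le_refl _

theorem pvPot_insert_lt (adj : List (Int × List (Int × Int))) (best : PySem.Dict Int Int)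
    (v te : Int) (hocc : (v, te) ∈ pvOccs adj)
    (hcond : ∀ b, best.get? v = some b → te < b) :
    pvPot adj (best.insert v te) < pvPot adj best := by
  unfold pvPot
  refine pvSum_map_lt _ _ _ (fun x _ => pvInd_insert_le best v te hcond x) (v, te) hocc ?_
  have hins := PySem.Dict.get?_insert best v v te
  rw [if_pos rfl] at hins
  cases hb : best.get? v with
  | none => simp [pvInd, hins, hb]
  | some b => have := hcond b hb
              simp only [pvInd, hins, hb]
              rw [if_neg (by omega : ¬ te < te), if_pos (by omega : te < b)]
              omega

-- BRIDGE between B's association-list primitives and A's dict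
theorem pvFind_eq_find? (l : List (Int × Int)) (v : Int) :
    pvFind l v = (l.find? (fun p => p.1 == v)).map Prod.snd := by
  induction l with
  | nil => rfl
  | cons p ps ih =>
    obtain ⟨w, t⟩ := p
    by_cases h : w = v
    · simp [pvFind, List.find?_cons, h]
    · simp [pvFind, List.find?_cons, h, ih]

theorem pvFind_eq_get? (d : PySem.Dict Int Int) (v : Int) :
    pvFind d.items v = d.get? v :=
  pvFind_eq_find? d.items v

theorem pvFindAdj_eq_pvLookup (adj : List (Int × List (Int × Int))) (u : Int) :
    pvFind adj u = pvLookup adj u := by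
  unfold pvLookup
  induction adj with
  | nil => rfl
  | cons p ps ih =>
    obtain ⟨w, es⟩ := p
    by_cases h : w = u
    · simp [pvFind, List.find?_cons, h]
    · simp [pvFind, List.find?_cons, h, ih]

theorem pvStore_of_not_mem (v te : Int) (l : List (Int × Int)) (h : v ∉ l.map Prod.fst) :
    pvStore v te l = l ++ [(v, te)] := by
  induction l with
  | nil => rfl
  | cons p ps ih =>
    obtain ⟨w, t⟩ := p
    simp only [List.map_cons, List.mem_cons] at h
    push_neg at h
    simp only [pvStore, if_neg (Ne.symm h.1 : ¬ w = v)]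
    rw [ih h.2]
    simp

theorem pvMapReplace_of_not_mem (v te : Int) (l : List (Int × Int)) (h : v ∉ l.map Prod.fst) :
    l.map (fun p => if p.1 == v then (v, te) else p) = l := by
  induction l with
  | nil => rfl
  | cons p ps ih =>
    obtain ⟨w, t⟩ := p
    simp only [List.map_cons, List.mem_cons] at h
    push_neg at h
    simp only [List.map_cons]
    rw [ih h.2]
    have hwv : (w == v) = false := by simpa using (Ne.symm h.1 : ¬ w = v)
    simp [hwv]

theorem pvStore_eq_mapReplace (v te : Int) : ∀ l : List (Int × Int),
    (l.map Prod.fst).Nodup → v ∈ l.map Prod.fst →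
    pvStore v te l = l.map (fun p => if p.1 == v then (v, te) else p) := by
  intro l
  induction l with
  | nil => intro _ hvmem; simp at hvmem
  | cons p ps ih =>
    intro hk hvmem
    obtain ⟨w, t⟩ := p
    simp only [List.map_cons, List.nodup_cons] at hk
    by_cases h : w = v
    · subst h
      simp only [pvStore, if_pos rfl, List.map_cons, beq_self_eq_true, if_pos]
      rw [pvMapReplace_of_not_mem w te ps hk.1]
    · simp only [List.map_cons, List.mem_cons] at hvmem
      rcases hvmem with h2 | h2
      · exact absurd h2.symm h
      · simp only [pvStore, if_neg h, List.map_cons]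
        rw [ih hk.2 h2]
        have hwv : (w == v) = false := by simpa using h
        simp [hwv]

theorem pvStore_eq_items_insert (d : PySem.Dict Int Int) (v te : Int) (hk : d.keys.Nodup) :
    pvStore v te d.items = (d.insert v te).items := by
  rw [PySem.Dict.items_insert]
  have hkeys : d.keys = d.items.map Prod.fst := by
    simp only [PySem.Dict.keys]
  by_cases hc : d.contains v = true
  · rw [if_pos hc]
    refine pvStore_eq_mapReplace v te d.items (hkeys ▸ hk) ?_
    rw [← hkeys]
    exact (PySem.Dict.contains_iff_mem_keys d v).mp hc
  · rw [if_neg hc]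
    apply pvStore_of_not_mem
    rw [← hkeys]
    intro hmem
    exact hc ((PySem.Dict.contains_iff_mem_keys d v).mpr hmem)

-- the comparison inside min2? on int pairs is exactly pvLt
theorem pvCond_eq_pvLt (x m : Int × Int) :
    (decide (x.1 < m.1) || !decide (m.1 < x.1) && decide (x.2 < m.2)) = pvLt x m := by
  obtain ⟨x1, x2⟩ := x; obtain ⟨m1, m2⟩ := m
  apply Bool.eq_iff_iff.mpr
  simp only [pvLt, Bool.or_eq_true, Bool.and_eq_true, Bool.not_eq_eq_eq_not, Bool.not_true,
    decide_eq_true_eq, decide_eq_false_iff_not, beq_iff_eq]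
  constructor <;> intro h <;> omega

-- the running-minimum fold underlying min2?: first lexicographic minimum
theorem pvMinFold_spec : ∀ (xs : List (Int × Int)) (acc : Option (Int × Int)),
    (match xs.foldl
        (fun acc x =>
          match acc with
          | none => some x
          | some m => if pvLt x m = true then some x else some m) acc with
     | none => acc = none ∧ xs = []
     | some r =>
        (acc = some r ∨ r ∈ xs) ∧
        (∀ p ∈ xs, pvLt p r = false) ∧
        (∀ w, acc = some w → pvLt w r = false)) := by
  intro xs
  induction xs with
  | nil =>
    intro acc
    cases acc with
    | none => exact ⟨rfl, rfl⟩
    | some r =>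
      refine ⟨Or.inl rfl, by simp, ?_⟩
      intro w hw
      cases hw
      exact pvLt_irrefl _
  | cons x xs ih =>
    intro acc
    cases acc with
    | none =>
      simp only [List.foldl_cons]
      have hspec := ih (some x)
      cases hres : xs.foldl _ (some x) with
      | none => rw [hres] at hspec; simp at hspec
      | some r =>
        rw [hres] at hspec
        refine ⟨?_, ?_, by intro w hw; cases hw⟩
        · rcases hspec.1 with h | h
          · simp only [Option.some.injEq] at h
            exact Or.inr (List.mem_cons.mpr (Or.inl h.symm))
          · exact Or.inr (List.mem_cons_of_mem _ h)
        · intro p hp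
          rcases List.mem_cons.mp hp with hp | hp
          · subst hp; exact hspec.2.2 _ rfl
          · exact hspec.2.1 p hp
    | some m =>
      by_cases hlt : pvLt x m = true
      · simp only [List.foldl_cons, hlt, if_pos]
        have hspec := ih (some x)
        cases hres : xs.foldl _ (some x) with
        | none => rw [hres] at hspec; simp at hspec
        | some r =>
          rw [hres] at hspec
          have hxr : pvLt x r = false := hspec.2.2 x rfl
          refine ⟨?_, ?_, ?_⟩
          · rcases hspec.1 with h | h
            · simp only [Option.some.injEq] at h
              exact Or.inr (List.mem_cons.mpr (Or.inl h.symm))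
            · exact Or.inr (List.mem_cons_of_mem _ h)
          · intro p hp
            rcases List.mem_cons.mp hp with hp | hp
            · subst hp; exact hxr
            · exact hspec.2.1 p hp
          · intro w hw
            cases hw
            by_contra hcon
            have hcon' : pvLt m r = true := by
              cases h : pvLt m r
              · exact absurd h hcon
              · rfl
            have := pvLt_trans hlt hcon'
            rw [hxr] at this
            exact absurd this (by simp)
      · have hlt' : pvLt x m = false := by simpa using hlt
        simp only [List.foldl_cons, hlt', Bool.false_eq_true, if_neg, not_false_iff]
        have hspec := ih (some m)
        cases hres : xs.foldl _ (some m) with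
        | none => rw [hres] at hspec; simp at hspec
        | some r =>
          rw [hres] at hspec
          have hmr : pvLt m r = false := hspec.2.2 m rfl
          refine ⟨?_, ?_, hspec.2.2⟩
          · rcases hspec.1 with h | h
            · exact Or.inl h
            · exact Or.inr (List.mem_cons_of_mem _ h)
          · intro p hp
            rcases List.mem_cons.mp hp with hp | hp
            · subst hp
              by_contra hcon
              have hcon' : pvLt p r = true := by
                cases h : pvLt p r
                · exact absurd h hcon
                · rfl
              rcases pvLt_total hlt' with h2 | h2
              · have := pvLt_trans h2 hcon'
                rw [hmr] at this
                exact absurd this (by simp)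
              · rw [← h2] at hmr
                rw [hmr] at hcon'
                exact absurd hcon' (by simp)
            · exact hspec.2.1 p hp

theorem pvMin2_eq_fold (xs : List (Int × Int)) :
    PySem.List.min2? xs (fun c => c.1) (fun c => c.2) =
      xs.foldl
        (fun acc x =>
          match acc with
          | none => some x
          | some m => if pvLt x m = true then some x else some m) none := by
  unfold PySem.List.min2?
  apply PySem.List.foldl_congr_mem
  intro acc x _
  cases acc with
  | none => rfl
  | some m =>
    simp only [pvCond_eq_pvLt]

theorem pvMin2_spec (xs : List (Int × Int)) :
    (match PySem.List.min2? xs (fun c => c.1) (fun c => c.2) with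
     | none => xs = []
     | some r => r ∈ xs ∧ ∀ p ∈ xs, pvLt p r = false) := by
  rw [pvMin2_eq_fold]
  have hspec := pvMinFold_spec xs none
  cases hres : xs.foldl _ (none : Option (Int × Int)) with
  | none => rw [hres] at hspec; exact hspec.2
  | some r =>
    rw [hres] at hspec
    refine ⟨?_, hspec.2.1⟩
    rcases hspec.1 with h | h
    · cases h
    · exact h

-- dict(pairs) round-trip: ofList of a nodup-keyed pair list keeps it as-is
theorem pvOfList_items (ps : List (Int × Int)) (h : (ps.map Prod.fst).Nodup) :
    (PySem.Dict.ofList ps).items = ps := by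
  have hfresh : ∀ a ∈ ps, (PySem.Dict.empty : PySem.Dict Int Int).contains a.1 = false := by
    intro a _
    exact PySem.Dict.contains_empty a.1
  have := PySem.Dict.items_foldl_insert_fresh ps (fun a => a.1) (fun a => a.2)
      (PySem.Dict.empty : PySem.Dict Int Int) hfresh h
  calc (PySem.Dict.ofList ps).items
      = (ps.foldl (fun d a => d.insert a.1 a.2) PySem.Dict.empty).items := rfl
    _ = (PySem.Dict.empty : PySem.Dict Int Int).items ++ ps.map (fun a => (a.1, a.2)) := this
    _ = ps := by
          rw [show (PySem.Dict.empty : PySem.Dict Int Int).items = [] from rfl]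
          simp

-- A's loop keeps the dict keys Nodup
theorem pvRelaxA_nodup (t : Int) : ∀ (es : List (Int × Int)) (best : PySem.Dict Int Int)
    (q : List (Int × Int)), best.keys.Nodup → (pvRelaxA t best es q).1.keys.Nodup := by
  intro es
  induction es with
  | nil => intro best q hk; exact hk
  | cons e es ih =>
    obtain ⟨v, te⟩ := e
    intro best q hk
    by_cases hc : (te ≥ t && (match best.get? v with | none => true | some b => decide (te < b))) = true
    · rw [show pvRelaxA t best ((v, te) :: es) q = pvRelaxA t (best.insert v te) es (q ++ [(te, v)])
          from by simp only [pvRelaxA, hc, if_pos]]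
      exact ih _ _ (PySem.Dict.nodup_keys_insert best v te hk)
    · rw [show pvRelaxA t best ((v, te) :: es) q = pvRelaxA t best es q
          from by simp only [pvRelaxA]; rw [if_neg hc]]
      exact ih _ _ hk

theorem pvLoopA_nodup (adj : List (Int × List (Int × Int))) : ∀ (fa : Nat)
    (best : PySem.Dict Int Int) (q : List (Int × Int)), best.keys.Nodup →
    (pvLoopA adj fa best q).keys.Nodup := by
  intro fa
  induction fa with
  | zero => intro best q hk; exact hk
  | succ fa ih =>
    intro best q hk
    cases hmin : pvHeapMin q with
    | none => simp only [pvLoopA, hmin]; exact hk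
    | some m =>
      obtain ⟨t, u⟩ := m
      rw [show pvLoopA adj (fa + 1) best q =
          (if (match best.get? u with | none => false | some b => decide (t > b)) = true then
            pvLoopA adj fa best (q.erase (t, u))
          else
            match pvLookup adj u with
            | none => best
            | some es =>
              let r := pvRelaxA t best es (q.erase (t, u))
              pvLoopA adj fa r.1 r.2) from by simp only [pvLoopA, hmin]]
      by_cases hg : (match best.get? u with | none => false | some b => decide (t > b)) = true
      · rw [if_pos hg]
        exact ih best _ hk
      · rw [if_neg hg]
        cases hlk : pvLookup adj u with
        | none => exact hk
        | some es => exact ih _ _ (pvRelaxA_nodup t es best _ hk)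

-- the invariant carried through the inner relaxation loop (u is the node being settled at time t)
def pvMid (source : Int) (adj : List (Int × List (Int × Int))) (depart : Int) (t u : Int) (settled : List Int)
    (best : PySem.Dict Int Int) (q : List (Int × Int)) : Prop :=
  best.keys.Nodup ∧
  (∀ t' v, (t', v) ∈ q → ∃ b, best.get? v = some b ∧ b ≤ t' ∧ ((v ∈ settled ∨ v = u) → b < t')) ∧
  (∀ v b, best.get? v = some b → v ∉ settled → v ≠ u → (b, v) ∈ q) ∧
  q.Nodup ∧
  (∀ v, (v ∈ settled ∨ v = u) → ∃ b, best.get? v = some b ∧ b ≤ t) ∧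
  (∀ t' w, (t', w) ∈ q → t ≤ t') ∧
  (∀ v ∈ best.keys, v ∈ pvNB source adj) ∧
  (∀ v c, best.get? v = some c → (v, c) ∈ pvClosure source adj depart)

theorem pvRelax_spec (source : Int) (adj : List (Int × List (Int × Int))) (depart : Int) (t u : Int)
    (settled : List Int) :
    ∀ (es : List (Int × Int)) (best : PySem.Dict Int Int) (q : List (Int × Int)),
      pvMid source adj depart t u settled best q →
      (∀ e ∈ es, e ∈ pvOccs adj) →
      (∀ e ∈ es, t ≤ e.2 → (e.1, e.2) ∈ pvClosure source adj depart) →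
      pvSweep t best.items es = (pvRelaxA t best es q).1.items ∧
      pvMid source adj depart t u settled (pvRelaxA t best es q).1 (pvRelaxA t best es q).2 ∧
      (pvRelaxA t best es q).2.length + pvPot adj (pvRelaxA t best es q).1 ≤
        q.length + pvPot adj best := by
  intro es
  induction es with
  | nil =>
    intro best q hmid _ _
    exact ⟨rfl, hmid, le_refl _⟩
  | cons e es ih =>
    obtain ⟨v, te⟩ := e
    intro best q hmid hocc hCes
    obtain ⟨hk, hC1, hC2, hnd, hset, hge, hNB, hC8⟩ := hmid
    have hBcondEq :
        (decide (t ≤ te) && (match pvFind best.items v with | none => true | some b => decide (te < b))) =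
        (te ≥ t && (match best.get? v with | none => true | some b => decide (te < b))) := by
      rw [pvFind_eq_get?]
    by_cases hcond : (te ≥ t && (match best.get? v with | none => true | some b => decide (te < b))) = true
    · -- the edge triggers a push
      have hA : pvRelaxA t best ((v, te) :: es) q = pvRelaxA t (best.insert v te) es (q ++ [(te, v)]) := by
        simp only [pvRelaxA, hcond, if_pos]
      have hB : pvSweep t best.items ((v, te) :: es) = pvSweep t ((best.insert v te).items) es := by
        simp only [pvSweep, List.foldl_cons, hBcondEq, hcond, if_pos]
        rw [pvStore_eq_items_insert best v te hk]
      have hc1 : t ≤ te := by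
        rcases Bool.and_eq_true_iff.mp hcond with ⟨h1, _⟩
        simpa using h1
      have hc2 : ∀ b, best.get? v = some b → te < b := by
        intro b hb
        rcases Bool.and_eq_true_iff.mp hcond with ⟨_, h2⟩
        rw [hb] at h2; simpa using h2
      have hv : ¬(v ∈ settled ∨ v = u) := by
        intro hmem
        obtain ⟨b, hb, hbt⟩ := hset v hmem
        have := hc2 b hb; omega
      have hnew : (te, v) ∉ q := by
        intro hmem
        obtain ⟨b, hb, hbt, _⟩ := hC1 te v hmem
        have := hc2 b hb; omega
      have hmid' : pvMid source adj depart t u settled (best.insert v te) (q ++ [(te, v)]) := by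
        refine ⟨PySem.Dict.nodup_keys_insert best v te hk, ?_, ?_, ?_, ?_, ?_, ?_, ?_⟩
        · intro t' w hw
          rcases List.mem_append.mp hw with hw | hw
          · obtain ⟨b, hb, hbt, hstrict⟩ := hC1 t' w hw
            by_cases hwv : w = v
            · subst hwv
              have hbv := hc2 b hb
              refine ⟨te, ?_, by omega, fun hmem => absurd hmem hv⟩
              rw [PySem.Dict.get?_insert]; simp
            · refine ⟨b, ?_, hbt, hstrict⟩
              rw [PySem.Dict.get?_insert]; simp [hwv, hb]
          · simp only [List.mem_singleton, Prod.mk.injEq] at hw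
            obtain ⟨h1, rfl⟩ := hw
            refine ⟨te, ?_, h1.ge, fun hmem => absurd hmem hv⟩
            rw [PySem.Dict.get?_insert]; simp
        · intro w b hb hns hnu
          by_cases hwv : w = v
          · subst hwv
            rw [PySem.Dict.get?_insert] at hb; simp at hb
            subst hb
            exact List.mem_append.mpr (Or.inr (by simp))
          · rw [PySem.Dict.get?_insert] at hb; rw [if_neg hwv] at hb
            exact List.mem_append.mpr (Or.inl (hC2 w b hb hns hnu))
        · simp only [List.nodup_append, List.nodup_cons, List.nodup_nil]
          refine ⟨hnd, by simp, ?_⟩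
          intro a hab b hb
          simp only [List.mem_singleton] at hb
          subst hb
          exact fun h => hnew (h ▸ hab)
        · intro w hmem
          obtain ⟨b, hb, hbt⟩ := hset w hmem
          have hwv : w ≠ v := by intro h; subst h; exact hv hmem
          refine ⟨b, ?_, hbt⟩
          rw [PySem.Dict.get?_insert]; simp [hwv, hb]
        · intro t' w hw
          rcases List.mem_append.mp hw with hw | hw
          · exact hge t' w hw
          · simp at hw; omega
        · intro w hw
          rcases (PySem.Dict.mem_keys_insert best v w te).mp hw with hwv | hw
          · subst hwv
            have : (w, te) ∈ pvOccs adj := hocc _ List.mem_cons_self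
            unfold pvNB
            rw [PySem.Set.mem_ofList]
            exact List.mem_cons.mpr (Or.inr (List.mem_map.mpr ⟨(w, te), this, rfl⟩))
          · exact hNB w hw
        · intro w c hc
          by_cases hwv : w = v
          · subst hwv
            rw [PySem.Dict.get?_insert] at hc
            simp at hc
            subst hc
            exact hCes (w, te) List.mem_cons_self hc1
          · rw [PySem.Dict.get?_insert, if_neg hwv] at hc
            exact hC8 w c hc
      have hres := ih (best.insert v te) (q ++ [(te, v)]) hmid' (fun e he => hocc e (List.mem_cons_of_mem _ he))
        (fun e he hte => hCes e (List.mem_cons_of_mem _ he) hte)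
      rw [hA, hB]
      refine ⟨hres.1, hres.2.1, ?_⟩
      have hpot := pvPot_insert_lt adj best v te (hocc _ List.mem_cons_self) hc2
      have hlen : (q ++ [(te, v)]).length = q.length + 1 := by simp
      have := hres.2.2
      omega
    · -- no push
      have hA : pvRelaxA t best ((v, te) :: es) q = pvRelaxA t best es q := by
        simp only [pvRelaxA]
        rw [if_neg hcond]
      have hB : pvSweep t best.items ((v, te) :: es) = pvSweep t best.items es := by
        simp only [pvSweep, List.foldl_cons, hBcondEq]
        rw [if_neg hcond]
      rw [hA, hB]
      exact ih best q ⟨hk, hC1, hC2, hnd, hset, hge, hNB, hC8⟩ (fun e he => hocc e (List.mem_cons_of_mem _ he))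
        (fun e he hte => hCes e (List.mem_cons_of_mem _ he) hte)

-- when every recorded node is settled, Source B's candidate list is empty and the loop stops
theorem pvLoopB_stuck (adj : List (Int × List (Int × Int))) (fb : Nat)
    (ps : List (Int × Int)) (settled : List Int)
    (h : pvCand settled ps = []) : pvLoopB adj fb ps settled = ps := by
  cases fb with
  | zero => rfl
  | succ fb =>
    have : PySem.List.min2? (pvCand settled ps) (fun c => c.1) (fun c => c.2) = none := by
      rw [h, pvMin2_eq_fold]
      rfl
    simp [pvLoopB, this]

theorem pvCand_empty_of_all_settled (settled : List Int) (ps : List (Int × Int))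
    (h : ∀ p ∈ ps, p.1 ∈ settled) : pvCand settled ps = [] := by
  unfold pvCand
  have : ps.filter (fun p => !settled.contains p.1) = [] := by
    rw [List.filter_eq_nil_iff]
    intro p hp
    have := h p hp
    simp [this]
  rw [this]
  rfl

theorem pvMem_cand (settled : List Int) (ps : List (Int × Int)) (c : Int × Int) :
    c ∈ pvCand settled ps ↔ (c.2, c.1) ∈ ps ∧ c.2 ∉ settled := by
  unfold pvCand
  constructor
  · intro hc
    obtain ⟨p, hp, hcp⟩ := List.mem_map.mp hc
    obtain ⟨hpm, hpf⟩ := List.mem_filter.mp hp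
    subst hcp
    refine ⟨by simpa using hpm, ?_⟩
    simpa using hpf
  · intro ⟨h1, h2⟩
    refine List.mem_map.mpr ⟨(c.2, c.1), ?_, rfl⟩
    refine List.mem_filter.mpr ⟨h1, ?_⟩
    simpa using h2

theorem pvLookup_some (adj : List (Int × List (Int × Int))) (u : Int)
    (hex : ∃ p ∈ adj, p.1 = u) :
    ∃ es, pvLookup adj u = some es ∧ ∀ e ∈ es, e ∈ pvOccs adj := by
  have hsome : (adj.find? (fun p => p.1 == u)).isSome := by
    rw [List.find?_isSome]
    obtain ⟨p, hp, hpu⟩ := hex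
    exact ⟨p, hp, by simp [hpu]⟩
  cases hf : adj.find? (fun p => p.1 == u) with
  | none => rw [hf] at hsome; simp at hsome
  | some p =>
    refine ⟨p.2, by simp [pvLookup, hf], ?_⟩
    intro e he
    exact List.mem_flatMap.mpr ⟨p, List.mem_of_find?_eq_some hf, he⟩

-- the universe of reachability pairs, and saturation of the closure iteration
def pvU (source : Int) (adj : List (Int × List (Int × Int))) (depart : Int) : List (Int × Int) :=
  PySem.Set.ofList ((source, depart) :: pvOccs adj)

theorem pvStepNews_sub_occs (adj : List (Int × List (Int × Int))) (R : List (Int × Int)) :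
    ∀ x ∈ pvStepNews adj R, x ∈ pvOccs adj := by
  intro x hx
  obtain ⟨p, hp, hx⟩ := List.mem_flatMap.mp hx
  cases hf : adj.find? (fun q => q.1 == p.1) with
  | none => rw [show pvLookup adj p.1 = none from by simp [pvLookup, hf]] at hx; simp at hx
  | some q =>
    rw [show pvLookup adj p.1 = some q.2 from by simp [pvLookup, hf]] at hx
    exact List.mem_flatMap.mpr ⟨q, List.mem_of_find?_eq_some hf, List.mem_of_mem_filter hx⟩

theorem pvStep_extensive (adj : List (Int × List (Int × Int))) (R : List (Int × Int)) :
    ∀ x ∈ R, x ∈ pvStep adj R := by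
  intro x hx
  unfold pvStep
  rw [PySem.Set.update_eq_append_filter]
  exact List.mem_append.mpr (Or.inl hx)

theorem pvStep_mem_news (adj : List (Int × List (Int × Int))) (R : List (Int × Int)) :
    ∀ x ∈ pvStepNews adj R, x ∈ pvStep adj R := by
  intro x hx
  by_cases hxR : x ∈ R
  · exact pvStep_extensive adj R x hxR
  · unfold pvStep
    rw [PySem.Set.update_eq_append_filter]
    refine List.mem_append.mpr (Or.inr ?_)
    rw [List.mem_filter]
    refine ⟨(PySem.Set.mem_ofList _ _).mpr hx, ?_⟩
    simp only [Bool.not_eq_true']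
    cases hc : PySem.Set.contains R x
    · rfl
    · exact absurd ((PySem.Set.contains_iff R x).mp hc) hxR

theorem pvStep_sub (source : Int) (adj : List (Int × List (Int × Int))) (depart : Int)
    (R : List (Int × Int)) (h : ∀ x ∈ R, x ∈ pvU source adj depart) :
    ∀ x ∈ pvStep adj R, x ∈ pvU source adj depart := by
  intro x hx
  unfold pvStep at hx
  rw [PySem.Set.update_eq_append_filter] at hx
  rcases List.mem_append.mp hx with hx | hx
  · exact h x hx
  · have := pvStepNews_sub_occs adj R x ((PySem.Set.mem_ofList _ _).mp (List.mem_of_mem_filter hx))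
    unfold pvU
    rw [PySem.Set.mem_ofList]
    exact List.mem_cons_of_mem _ this

theorem pvStep_grow (adj : List (Int × List (Int × Int))) (R : List (Int × Int)) :
    pvStep adj R = R ∨ R.length < (pvStep adj R).length := by
  unfold pvStep
  rw [PySem.Set.update_eq_append_filter]
  cases hL : (PySem.Set.ofList (pvStepNews adj R)).filter (fun y => !(PySem.Set.contains R y)) with
  | nil => left; simp [hL]
  | cons a L => right; simp [hL]

theorem pvIter_fix (source : Int) (adj : List (Int × List (Int × Int))) (depart : Int) :
    ∀ (n : Nat) (s : List (Int × Int)), s.Nodup → (∀ x ∈ s, x ∈ pvU source adj depart) →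
      (pvU source adj depart).length ≤ n + s.length →
      pvStep adj ((pvStep adj)^[n] s) = (pvStep adj)^[n] s := by
  intro n
  induction n with
  | zero =>
    intro s hnd hsub hlen
    simp only [Function.iterate_zero, id]
    have hUnd : (pvU source adj depart).Nodup := PySem.Set.nodup_ofList _
    have hsper := List.subperm_of_subset hnd hsub
    have hperm : s.Perm (pvU source adj depart) :=
      hsper.perm_of_length_le (by simpa using hlen)
    have hUs : ∀ y ∈ pvU source adj depart, y ∈ s := fun y hy => hperm.mem_iff.mpr hy
    unfold pvStep
    rw [PySem.Set.update_eq_append_filter]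
    have hnil : (PySem.Set.ofList (pvStepNews adj s)).filter (fun y => !(PySem.Set.contains s y)) = [] := by
      rw [List.filter_eq_nil_iff]
      intro y hy
      have hyocc := pvStepNews_sub_occs adj s y ((PySem.Set.mem_ofList _ _).mp hy)
      have hyU : y ∈ pvU source adj depart := by
        unfold pvU; rw [PySem.Set.mem_ofList]; exact List.mem_cons_of_mem _ hyocc
      have hys := hUs y hyU
      simpa using hys
    rw [hnil, List.append_nil]
  | succ n ih =>
    intro s hnd hsub hlen
    by_cases hfix : pvStep adj s = s
    · rw [Function.iterate_fixed hfix, hfix]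
    · rw [Function.iterate_succ_apply]
      refine ih (pvStep adj s) ?_ (pvStep_sub source adj depart s hsub) ?_
      · unfold pvStep
        exact PySem.Set.nodup_update s (pvStepNews adj s) hnd
      · rcases pvStep_grow adj s with h | h
        · exact absurd h hfix
        · omega

theorem pvClosure_fix (source : Int) (adj : List (Int × List (Int × Int))) (depart : Int) :
    pvStep adj (pvClosure source adj depart) = pvClosure source adj depart := by
  unfold pvClosure
  refine pvIter_fix source adj depart (pvEdgeCount adj + 1) [(source, depart)] (by simp)
    (by intro x hx
        simp only [List.mem_singleton] at hx
        subst hx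
        unfold pvU
        rw [PySem.Set.mem_ofList]
        exact List.mem_cons_self) ?_
  have h1 := PySem.Set.length_ofList_le ((source, depart) :: pvOccs adj)
  have hE : (pvOccs adj).length = pvEdgeCount adj := by
    unfold pvOccs pvEdgeCount
    rw [List.length_flatMap]
  unfold pvU
  simp only [List.length_cons] at *
  omega

theorem pvClosure_base (source : Int) (adj : List (Int × List (Int × Int))) (depart : Int) :
    (source, depart) ∈ pvClosure source adj depart := by
  unfold pvClosure
  generalize pvEdgeCount adj + 1 = n
  induction n with
  | zero => simp
  | succ n ih =>
    rw [Function.iterate_succ_apply']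
    exact pvStep_extensive adj _ _ ih

theorem pvClosure_closed (source : Int) (adj : List (Int × List (Int × Int))) (depart : Int)
    (u t : Int) (es : List (Int × Int)) (v te : Int)
    (hmem : (u, t) ∈ pvClosure source adj depart) (hlk : pvLookup adj u = some es)
    (he : (v, te) ∈ es) (hte : t ≤ te) : (v, te) ∈ pvClosure source adj depart := by
  have hnews : (v, te) ∈ pvStepNews adj (pvClosure source adj depart) := by
    refine List.mem_flatMap.mpr ⟨(u, t), hmem, ?_⟩
    rw [show pvLookup adj (u, t).1 = some es from hlk]
    rw [List.mem_filter]
    exact ⟨he, by simpa using hte⟩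
  have := pvStep_mem_news adj _ _ hnews
  rwa [pvClosure_fix source adj depart] at this

theorem pv_main (source : Int) (adj : List (Int × List (Int × Int))) (depart : Int)
    (hpre : Pre_temporal_reach_from source adj depart) :
    ∀ (fa fb : Nat) (best : PySem.Dict Int Int) (q : List (Int × Int)) (settled : List Int),
      pvInv source adj depart best q settled →
      q.length + pvPot adj best ≤ fa →
      (pvNB source adj).length ≤ fb + settled.length →
      (pvLoopA adj fa best q).items = pvLoopB adj fb best.items settled := by
  intro fa
  induction fa with
  | zero =>
    intro fb best q settled hinv hfa _
    obtain ⟨hk, hC1, hC2, _, _, _, _, _⟩ := hinv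
    have hq : q = [] := by
      cases q with
      | nil => rfl
      | cons x q => simp at hfa
    subst hq
    rw [show pvLoopA adj 0 best [] = best from rfl]
    refine (pvLoopB_stuck adj fb best.items settled ?_).symm
    refine pvCand_empty_of_all_settled settled best.items ?_
    intro p hp
    by_contra hns
    have hget : best.get? p.1 = some p.2 :=
      (PySem.Dict.get?_eq_some_iff_mem_items best p.1 p.2 hk).mpr (by
        obtain ⟨a, c⟩ := p; exact hp)
    have := hC2 p.1 p.2 hget hns
    simp at this
  | succ fa ih =>
    intro fb best q settled hinv hfa hfb
    obtain ⟨hk, hC1, hC2, hnd, hC4, hNBk, hsnd, hC8⟩ := hinv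
    cases hmin : pvHeapMin q with
    | none =>
      have hq : q = [] := pvHeapMin_eq_none.mp hmin
      subst hq
      rw [show pvLoopA adj (fa + 1) best [] = best from by simp [pvLoopA, pvHeapMin]]
      refine (pvLoopB_stuck adj fb best.items settled ?_).symm
      refine pvCand_empty_of_all_settled settled best.items ?_
      intro p hp
      by_contra hns
      have hget : best.get? p.1 = some p.2 :=
        (PySem.Dict.get?_eq_some_iff_mem_items best p.1 p.2 hk).mpr (by
          obtain ⟨a, c⟩ := p; exact hp)
      have := hC2 p.1 p.2 hget hns
      simp at this
    | some m =>
      obtain ⟨t, u⟩ := m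
      have hmem : (t, u) ∈ q := pvHeapMin_mem hmin
      have hminp := pvHeapMin_min hmin
      obtain ⟨b, hb, hbt, hbs⟩ := hC1 t u hmem
      have hloopA : pvLoopA adj (fa + 1) best q =
          (if (match best.get? u with | none => false | some c => decide (t > c)) = true then
            pvLoopA adj fa best (q.erase (t, u))
          else
            match pvLookup adj u with
            | none => best
            | some es =>
              let r := pvRelaxA t best es (q.erase (t, u))
              pvLoopA adj fa r.1 r.2) := by
        simp only [pvLoopA, hmin]
      have hqlen : (q.erase (t, u)).length = q.length - 1 := List.length_erase_of_mem hmem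
      have hqsub : ∀ p ∈ q.erase (t, u), p ∈ q := fun p hp => List.mem_of_mem_erase hp
      have hq1 : 1 ≤ q.length := List.length_pos_of_mem hmem
      by_cases hskip : b < t
      · -- stale entry: A skips it, B's state is unchanged
        rw [hloopA, if_pos (by rw [hb]; simpa using hskip)]
        refine ih fb best (q.erase (t, u)) settled ⟨hk, ?_, ?_, hnd.erase _, ?_, hNBk, hsnd, hC8⟩ (by omega) hfb
        · intro t' v hv; exact hC1 t' v (hqsub _ hv)
        · intro v c hc hns
          have hne : (c, v) ≠ (t, u) := by
            intro h
            rw [Prod.mk.injEq] at h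
            rw [h.2] at hc
            rw [hc] at hb
            cases hb
            omega
          exact (List.mem_erase_of_ne hne).mpr (hC2 v c hc hns)
        · intro v hv
          obtain ⟨c, hc, hcle⟩ := hC4 v hv
          exact ⟨c, hc, fun t' w hw => hcle t' w (hqsub _ hw)⟩
      · -- genuine extraction: A settles u at time t; B selects the same pair
        have hteq : b = t := le_antisymm hbt (by omega)
        rw [hteq] at hb hbs
        have hus : u ∉ settled := fun h => lt_irrefl _ (hbs h)
        rw [hloopA, if_neg (by rw [hb]; simp)]
        have huk : u ∈ best.keys :=
          of_not_not (fun h => by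
            rw [(PySem.Dict.get?_eq_none_iff_not_mem_keys best u).mpr h] at hb; cases hb)
        have huNB : u ∈ pvNB source adj := hNBk u huk
        have huC : (u, t) ∈ pvClosure source adj depart := hC8 u t hb
        obtain ⟨es, hes, hesocc⟩ := pvLookup_some adj u (hpre (u, t) huC)
        rw [hes]
        have hfb1 : 1 ≤ fb := by
          have hsub : ∀ x ∈ u :: settled, x ∈ pvNB source adj := by
            intro x hx
            rcases List.mem_cons.mp hx with hx | hx
            · subst hx; exact huNB
            · obtain ⟨c, hc, _⟩ := hC4 x hx
              refine hNBk x (of_not_not (fun h => ?_))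
              rw [(PySem.Dict.get?_eq_none_iff_not_mem_keys best x).mpr h] at hc; cases hc
          have hnd2 : (u :: settled).Nodup := List.nodup_cons.mpr ⟨hus, hsnd⟩
          have := List.Subperm.length_le (List.subperm_of_subset hnd2 hsub)
          simp at this
          omega
        obtain ⟨fb', rfl⟩ : ∃ fb', fb = fb' + 1 := ⟨fb - 1, by omega⟩
        -- B's candidate minimum is exactly (t, u)
        have humem : (u, t) ∈ best.items := (PySem.Dict.get?_eq_some_iff_mem_items best u t hk).mp hb
        have hcmem : (t, u) ∈ pvCand settled best.items :=
          (pvMem_cand settled best.items (t, u)).mpr ⟨humem, hus⟩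
        have hsc := pvMin2_spec (pvCand settled best.items)
        have hscan : PySem.List.min2? (pvCand settled best.items) (fun c => c.1) (fun c => c.2) =
            some (t, u) := by
          cases hres : PySem.List.min2? (pvCand settled best.items) (fun c => c.1) (fun c => c.2) with
          | none =>
            rw [hres] at hsc
            rw [hsc] at hcmem
            simp at hcmem
          | some r =>
            rw [hres] at hsc
            obtain ⟨hrmem, hr2⟩ := hsc
            obtain ⟨hrp, hrns⟩ := (pvMem_cand settled best.items r).mp hrmem
            have hgr : best.get? r.2 = some r.1 :=
              (PySem.Dict.get?_eq_some_iff_mem_items best r.2 r.1 hk).mpr hrp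
            have hqr : (r.1, r.2) ∈ q := hC2 r.2 r.1 hgr hrns
            have h1 : pvLt (r.1, r.2) (t, u) = false := hminp _ hqr
            have h2 : pvLt (t, u) r = false := hr2 (t, u) hcmem
            obtain ⟨r1, r2⟩ := r
            have heq := pvLt_antisymm h2 h1
            rw [heq]
        -- the mid-invariant holds when the relaxation of u's edges starts
        have hmid0 : pvMid source adj depart t u settled best (q.erase (t, u)) := by
          refine ⟨hk, ?_, ?_, hnd.erase _, ?_, ?_, hNBk, hC8⟩
          · intro t' v hv
            obtain ⟨c, hc, hct, hcs⟩ := hC1 t' v (hqsub _ hv)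
            refine ⟨c, hc, hct, ?_⟩
            intro hvm
            rcases hvm with hvm | hvm
            · exact hcs hvm
            · subst hvm
              have hcb : c = t := by rw [hc] at hb; cases hb; rfl
              have hne : (t', v) ≠ (t, v) := fun h => by
                have := (hnd.mem_erase_iff.mp hv).1
                exact this h
              have hge := pvLt_fst_le (hminp _ (hqsub _ hv))
              simp only at hge
              have : t' ≠ t := fun h => hne (by rw [h])
              omega
          · intro v c hc hns hnu
            have hne : (c, v) ≠ (t, u) := fun h => by
              rw [Prod.mk.injEq] at h
              exact hnu h.2
            exact (List.mem_erase_of_ne hne).mpr (hC2 v c hc hns)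
          · intro v hvm
            rcases hvm with hvm | hvm
            · obtain ⟨c, hc, hcle⟩ := hC4 v hvm
              exact ⟨c, hc, hcle t u hmem⟩
            · subst hvm; exact ⟨t, hb, le_refl t⟩
          · intro t' w hw
            have := pvLt_fst_le (hminp _ (hqsub _ hw))
            simpa using this
        have hCes : ∀ e ∈ es, t ≤ e.2 → (e.1, e.2) ∈ pvClosure source adj depart := by
          intro e he hte
          exact pvClosure_closed source adj depart u t es e.1 e.2 huC hes he hte
        have hrel := pvRelax_spec source adj depart t u settled es best (q.erase (t, u)) hmid0 hesocc hCes
        obtain ⟨hrB, hmid', hrpot⟩ := hrel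
        obtain ⟨hk', hC1', hC2', hnd', hset', hge', hNB', hC8'⟩ := hmid'
        have haddlen : (settled ++ [u]).length = settled.length + 1 := by simp
        have hmemadd : ∀ v, v ∈ settled ++ [u] ↔ v ∈ settled ∨ v = u := by
          intro v
          simp [List.mem_append]
        have hinv' : pvInv source adj depart (pvRelaxA t best es (q.erase (t, u))).1
            (pvRelaxA t best es (q.erase (t, u))).2 (settled ++ [u]) := by
          refine ⟨hk', ?_, ?_, hnd', ?_, hNB', ?_, hC8'⟩
          · intro t' v hv
            obtain ⟨c, hc, hct, hcs⟩ := hC1' t' v hv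
            exact ⟨c, hc, hct, fun hm => hcs ((hmemadd v).mp hm)⟩
          · intro v c hc hns
            have h1 : v ∉ settled := fun h => hns ((hmemadd v).mpr (Or.inl h))
            have h2 : v ≠ u := fun h => hns ((hmemadd v).mpr (Or.inr h))
            exact hC2' v c hc h1 h2
          · intro v hv
            obtain ⟨c, hc, hct⟩ := hset' v ((hmemadd v).mp hv)
            exact ⟨c, hc, fun t' w hw => le_trans hct (hge' t' w hw)⟩
          · simp [List.nodup_append, hsnd]
            intro a ha h
            exact hus (h ▸ ha)
        show (pvLoopA adj fa (pvRelaxA t best es (q.erase (t, u))).1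
              (pvRelaxA t best es (q.erase (t, u))).2).items =
            pvLoopB adj (fb' + 1) best.items settled
        rw [show pvLoopB adj (fb' + 1) best.items settled =
              pvLoopB adj fb' (pvSweep t best.items es) (settled ++ [u]) from by
            simp only [pvLoopB, hscan, pvFindAdj_eq_pvLookup, hes]]
        rw [hrB]
        exact ih fb' _ _ _ hinv' (by omega) (by rw [haddlen]; omega)

-- ===== VERDICT (by name: the statement is the Claim_ definition above) =====
theorem temporal_reach_from_spec : Claim_equal_temporal_reach_from := by
  intro source adj depart _ hpre
  unfold Spec_temporal_reach_from temporal_reach_from temporal_reach_from_alt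
  have hE : (pvOccs adj).length = pvEdgeCount adj := by
    unfold pvOccs pvEdgeCount
    rw [List.length_flatMap]
  have hget : ∀ v, ((PySem.Dict.empty).insert source depart).get? v =
      if v = source then some depart else none := by
    intro v
    rw [PySem.Dict.get?_insert]
    by_cases h : v = source
    · rw [if_pos h, if_pos h]
    · rw [if_neg h, if_neg h, PySem.Dict.get?_empty]
  have hkeys : ((PySem.Dict.empty).insert source depart).keys = [source] := by
    rw [PySem.Dict.keys_insert_of_not_contains]
    · simp
    · rfl
  have hitems0 : ((PySem.Dict.empty : PySem.Dict Int Int).insert source depart).items =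
      [(source, depart)] := by
    rw [PySem.Dict.items_insert_of_not_contains]
    · rw [show (PySem.Dict.empty : PySem.Dict Int Int).items = [] from rfl]
      simp
    · rfl
  have hinv0 : pvInv source adj depart ((PySem.Dict.empty).insert source depart)
      [(depart, source)] [] := by
    refine ⟨by rw [hkeys]; simp, ?_, ?_, by simp, ?_, ?_, by simp, ?_⟩
    · intro t v hv
      simp only [List.mem_singleton, Prod.mk.injEq] at hv
      obtain ⟨h1, h2⟩ := hv
      refine ⟨depart, by rw [h2, hget]; simp, by omega, ?_⟩
      intro h
      simp at h
    · intro v c hc _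
      rw [hget] at hc
      by_cases h : v = source
      · rw [if_pos h] at hc
        cases hc
        rw [h]
        simp
      · rw [if_neg h] at hc
        cases hc
    · intro v hv
      simp at hv
    · intro v hv
      rw [hkeys] at hv
      simp at hv
      subst hv
      unfold pvNB
      rw [PySem.Set.mem_ofList]
      exact List.mem_cons_self
    · intro v c hc
      rw [hget] at hc
      by_cases h : v = source
      · rw [if_pos h] at hc
        cases hc
        rw [h]
        exact pvClosure_base source adj depart
      · rw [if_neg h] at hc
        cases hc
  have hfa : [(depart, source)].length + pvPot adj ((PySem.Dict.empty).insert source depart) ≤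
      pvEdgeCount adj + 2 := by
    have h1 := pvPot_le adj ((PySem.Dict.empty).insert source depart)
    simp only [List.length_singleton]
    omega
  have hfb : (pvNB source adj).length ≤ (pvEdgeCount adj + 2) + ([] : List Int).length := by
    have h1 := PySem.Set.length_ofList_le (source :: (pvOccs adj).map Prod.fst)
    unfold pvNB
    simp only [List.length_cons, List.length_map] at h1
    simp only [List.length_nil]
    omega
  have hmain := pv_main source adj depart hpre (pvEdgeCount adj + 2) (pvEdgeCount adj + 2)
      ((PySem.Dict.empty).insert source depart) [(depart, source)] [] hinv0 hfa hfb
  rw [hitems0] at hmain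
  have hfuel : (adj.map (fun p => p.2.length)).sum + 2 = pvEdgeCount adj + 2 := rfl
  rw [hfuel]
  have hnodA : (pvLoopA adj (pvEdgeCount adj + 2) ((PySem.Dict.empty).insert source depart)
      [(depart, source)]).keys.Nodup := by
    apply pvLoopA_nodup
    rw [hkeys]
    simp
  have hnodL : ((pvLoopB adj (pvEdgeCount adj + 2) [(source, depart)] []).map Prod.fst).Nodup := by
    rw [← hmain]
    simpa only [PySem.Dict.keys] using hnodA
  rw [pvOfList_items _ hnodL]
  exact hmain
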